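-- pv_equiv track=rewrite | github.com/ephrhr/LeetcodePy | Solutions/1402.reducing-dishes.py | maxSatisfaction
-- ===== SOURCE A (Python) =====
-- from typing import List
--
-- def maxSatisfaction(satisfaction: List[int]) -> int:
--     satisfaction.sort(reverse=True)
--     n = len(satisfaction)
--     ans = sum((n - i) * satisfaction[i] for i in range(n))
--     while n > 0 and satisfaction[-1] < 0:
--         v = sum(satisfaction)
--         satisfaction.pop()
--         n = len(satisfaction)
--         if v > 0: return ans
--         ans -= v
--     return max(0, ans)
-- ===== SOURCE B (Python) =====
-- def maxSatisfaction(satisfaction):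
--     ans = 0
--     total = 0
--     for x in sorted(satisfaction, reverse=True):
--         total += x
--         if total <= 0:
--             break
--         ans += total
--     return ans
-- ===== Notes on version B (the rewrite author's own statement) =====
-- stated objective: alternative
-- what changed: B replaces A's backwards pop-and-resum while-loop over the sorted list with a single forward pass that maintains a running prefix total and running answer, stopping at the first nonpositive prefix sum; B also does not mutate the input list (A sorts and pops it in place).
import Mathlib
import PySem

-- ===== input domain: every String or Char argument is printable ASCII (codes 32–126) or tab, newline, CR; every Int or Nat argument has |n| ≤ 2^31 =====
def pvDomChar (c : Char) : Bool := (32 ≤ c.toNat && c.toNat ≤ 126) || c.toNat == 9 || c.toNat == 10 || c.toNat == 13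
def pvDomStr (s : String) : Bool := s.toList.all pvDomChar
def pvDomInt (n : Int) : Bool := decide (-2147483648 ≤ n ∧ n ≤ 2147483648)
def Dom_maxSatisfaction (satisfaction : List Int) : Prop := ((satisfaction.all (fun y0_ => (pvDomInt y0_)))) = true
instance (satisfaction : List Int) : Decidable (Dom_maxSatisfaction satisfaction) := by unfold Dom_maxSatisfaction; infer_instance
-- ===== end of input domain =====

-- B replaces A's backwards pop-and-resum while-loop with one forward pass over the sorted
-- list keeping a running prefix total; equivalence is about the RETURN value only (A sorts
-- and pops its argument in place, B leaves it untouched).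

-- ===== PORT A =====
-- the while loop: while n > 0 and satisfaction[-1] < 0: v = sum(...); pop; if v > 0: return ans; ans -= v
def maxSatLoop (s : List Int) (ans : Int) : Int :=
  if _h : 0 < s.length ∧ PySem.List.pyGetD s (-1) 0 < 0 then
    let v := s.sum
    if v > 0 then ans else maxSatLoop s.dropLast (ans - v)
  else max 0 ans
termination_by s.length
decreasing_by simp [List.length_dropLast]; omega

def maxSatisfaction (satisfaction : List Int) : Int :=
  let s := PySem.List.sorted satisfaction (fun x => x) true
  let n := s.length
  let ans := (PySem.List.pyRange 0 (n : Int) 1).foldl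
    (fun acc i => acc + ((n : Int) - i) * PySem.List.pyGetD s i 0) 0
  maxSatLoop s ans

-- ===== PORT B =====
-- the for loop with break: carries (ans, total)
def altLoop : List Int → Int → Int → Int
  | [], ans, _ => ans
  | x :: rest, ans, total =>
      let t := total + x
      if t ≤ 0 then ans else altLoop rest (ans + t) t

def maxSatisfaction_alt (satisfaction : List Int) : Int :=
  altLoop (PySem.List.sorted satisfaction (fun x => x) true) 0 0

-- ===== PRECONDITION & SPEC =====
def Spec_maxSatisfaction (satisfaction : List Int) (out : Int) : Prop := out = maxSatisfaction_alt satisfaction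
instance (satisfaction : List Int) (out : Int) : Decidable (Spec_maxSatisfaction satisfaction out) := by unfold Spec_maxSatisfaction; infer_instance

-- ===== CLAIM (what is proved, stated in full; the proofs are below) =====
def Claim_equal_maxSatisfaction : Prop := ∀ (satisfaction : List Int), Dom_maxSatisfaction satisfaction → Spec_maxSatisfaction satisfaction (maxSatisfaction satisfaction)

-- ===== LEMMAS AND PROOFS =====

-- WSum l t = Σ_j (t + j-th prefix sum of l): the value A's ans tracks
def WSum : List Int → Int → Int
  | [], _ => 0
  | x :: r, t => (t + x) + WSum r (t + x)

-- all (shifted) prefix sums are positive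
def allPos : List Int → Int → Prop
  | [], _ => True
  | x :: r, t => 0 < t + x ∧ allPos r (t + x)

theorem WSum_shift : ∀ (l : List Int) (t c : Int), WSum l (t + c) = WSum l t + l.length * c := by
  intro l
  induction l with
  | nil => intro t c; simp [WSum]
  | cons x r ih =>
      intro t c
      simp only [WSum, List.length_cons]
      have := ih (t + x) c
      rw [show t + c + x = t + x + c by ring, this]
      push_cast
      ring

theorem WSum_snoc : ∀ (l : List Int) (x : Int) (t : Int),
    WSum (l ++ [x]) t = WSum l t + (t + l.sum + x) := by
  intro l
  induction l with
  | nil => intro x t; simp [WSum]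
  | cons y r ih =>
      intro x t
      simp only [List.cons_append, WSum, ih, List.sum_cons]
      ring

theorem WSum_all_zero : ∀ (l : List Int), (∀ y ∈ l, y = 0) → WSum l 0 = 0 := by
  intro l
  induction l with
  | nil => intro _; rfl
  | cons x r ih =>
      intro h
      have hx : x = 0 := h x (by simp)
      simp [WSum, hx, ih (fun y hy => h y (by simp [hy]))]

theorem altLoop_acc : ∀ (l : List Int) (a t : Int), altLoop l a t = a + altLoop l 0 t := by
  intro l
  induction l with
  | nil => intro a t; simp [altLoop]
  | cons x r ih =>
      intro a t
      simp only [altLoop]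
      by_cases h : t + x ≤ 0
      · simp [h]
      · simp only [if_neg h]
        rw [ih (a + (t + x)), ih (0 + (t + x))]
        ring

theorem altLoop_allPos : ∀ (l : List Int) (t : Int), allPos l t → altLoop l 0 t = WSum l t := by
  intro l
  induction l with
  | nil => intro t _; rfl
  | cons x r ih =>
      intro t h
      obtain ⟨h1, h2⟩ := h
      simp only [altLoop, WSum, if_neg (by omega : ¬ t + x ≤ 0)]
      rw [altLoop_acc, ih _ h2]
      ring

theorem altLoop_snoc_stop : ∀ (l : List Int) (x a t : Int), t + l.sum + x ≤ 0 →
    altLoop (l ++ [x]) a t = altLoop l a t := by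
  intro l
  induction l with
  | nil =>
      intro x a t h
      simp only [List.nil_append, altLoop]
      rw [if_pos (by simpa using h)]
  | cons y r ih =>
      intro x a t h
      simp only [List.cons_append, altLoop]
      by_cases hy : t + y ≤ 0
      · simp [hy]
      · simp only [if_neg hy]
        exact ih x _ _ (by simp [List.sum_cons] at h ⊢; omega)

theorem allPos_iff : ∀ (l : List Int) (t : Int),
    allPos l t ↔ ∀ j, 0 < j → j ≤ l.length → 0 < t + (l.take j).sum := by
  intro l
  induction l with
  | nil =>
      intro t
      constructor
      · intro _ j hj hj'; simp at hj'; omega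
      · intro _; trivial
  | cons x r ih =>
      intro t
      constructor
      · rintro ⟨h1, h2⟩ j hj hj'
        match j with
        | 1 => simpa using h1
        | (jj+2) =>
            have := (ih (t + x)).mp h2 (jj + 1) (by omega) (by simp at hj'; omega)
            simp [List.sum_cons] at this ⊢
            omega
      · intro h
        refine ⟨by simpa using h 1 (by omega) (by simp), (ih (t + x)).mpr ?_⟩
        intro j hj hj'
        have := h (j + 1) (by omega) (by simp; omega)
        simp [List.sum_cons] at this ⊢
        omega

theorem exists_pos_of_sum_pos : ∀ (l : List Int), 0 < l.sum → ∃ e ∈ l, 0 < e := by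
  intro l
  induction l with
  | nil => intro h; simp at h
  | cons x r ih =>
      intro h
      by_cases hx : 0 < x
      · exact ⟨x, by simp, hx⟩
      · obtain ⟨e, he, hpe⟩ := ih (by simp [List.sum_cons] at h; omega)
        exact ⟨e, by simp [he], hpe⟩

theorem allPos_of_sum_pos (l : List Int) (hp : l.Pairwise (fun a b => b ≤ a)) (hs : 0 < l.sum) :
    allPos l 0 := by
  rw [allPos_iff]
  intro j hj hjlen
  by_contra hle
  push Not at hle
  simp only [zero_add] at hle
  have hsplit : l = l.take j ++ l.drop j := (List.take_append_drop j l).symm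
  have hdrop : 0 < (l.drop j).sum := by
    have : (l.take j).sum + (l.drop j).sum = l.sum := by
      rw [← List.sum_append, ← hsplit]
    omega
  obtain ⟨e, he, hpe⟩ := exists_pos_of_sum_pos _ hdrop
  have hrel : ∀ y ∈ l.take j, e ≤ y := by
    intro y hy
    have := hsplit ▸ hp
    rw [List.pairwise_append] at this
    exact this.2.2 y hy e he
  have hpos : 0 < (l.take j).sum :=
    List.sum_pos _ (fun y hy => lt_of_lt_of_le hpe (hrel y hy))
      (by
        intro hnil
        have : (l.take j).length = 0 := by rw [hnil]; rfl
        rw [List.length_take] at this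
        omega)
  omega

theorem altLoop_nonneg : ∀ (l : List Int) (t : Int), 0 ≤ t → (∀ y ∈ l, 0 ≤ y) →
    l.Pairwise (fun a b => b ≤ a) → altLoop l 0 t = WSum l t ∧ 0 ≤ WSum l t := by
  intro l
  induction l with
  | nil => intro t _ _ _; exact ⟨rfl, le_refl 0⟩
  | cons x r ih =>
      intro t ht hnn hp
      have hx : 0 ≤ x := hnn x (by simp)
      by_cases hstop : t + x ≤ 0
      · have ht0 : t = 0 := by omega
        have hx0 : x = 0 := by omega
        have hr0 : ∀ y ∈ r, y = 0 := by
          intro y hy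
          have h1 : y ≤ x := (List.pairwise_cons.mp hp).1 y hy
          have h2 : 0 ≤ y := hnn y (by simp [hy])
          omega
        have hw : WSum (x :: r) t = 0 := by
          have : WSum r 0 = 0 := WSum_all_zero r hr0
          simp [WSum, ht0, hx0, this]
        refine ⟨?_, by omega⟩
        simp [altLoop, hstop, hw]
      · have := ih (t + x) (by omega) (fun y hy => hnn y (by simp [hy]))
          (List.pairwise_cons.mp hp).2
        refine ⟨?_, ?_⟩
        · simp only [altLoop, if_neg hstop, WSum]
          rw [altLoop_acc, this.1]
          ring
        · simp only [WSum]
          omega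

theorem pairwise_dropLast {l : List Int} (x : Int)
    (hp : (l ++ [x]).Pairwise (fun a b => b ≤ a)) : l.Pairwise (fun a b => b ≤ a) :=
  (List.pairwise_append.mp hp).1

theorem main_loop_eq : ∀ (l : List Int), l.Pairwise (fun a b => b ≤ a) →
    maxSatLoop l (WSum l 0) = altLoop l 0 0 := by
  intro l
  induction l using List.reverseRecOn with
  | nil =>
      intro _
      rw [maxSatLoop]
      simp [altLoop, WSum]
  | append_singleton l' x ih =>
      intro hp
      have hlast : PySem.List.pyGetD (l' ++ [x]) (-1) 0 = x :=
        PySem.List.pyGetD_neg_one_append_singleton l' x 0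
      by_cases hx : x < 0
      · rw [maxSatLoop]
        rw [dif_pos ⟨by simp, by rw [hlast]; exact hx⟩]
        by_cases hv : (l' ++ [x]).sum > 0
        · rw [if_pos hv]
          have hap : allPos (l' ++ [x]) 0 := allPos_of_sum_pos _ hp hv
          rw [← altLoop_allPos _ _ hap]
        · rw [if_neg hv]
          have hsum : (l' ++ [x]).sum = l'.sum + x := by simp
          have harg : WSum (l' ++ [x]) 0 - (l' ++ [x]).sum = WSum l' 0 := by
            rw [WSum_snoc, hsum]; ring
          rw [List.dropLast_concat, harg, ih (pairwise_dropLast x hp),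
            altLoop_snoc_stop l' x 0 0 (by simp at hv ⊢; omega)]
      · rw [maxSatLoop]
        rw [dif_neg (by rw [hlast]; omega)]
        have hnn : ∀ y ∈ l' ++ [x], 0 ≤ y := by
          intro y hy
          rcases List.mem_append.mp hy with h | h
          · have := (List.pairwise_append.mp hp).2.2 y h x (by simp)
            omega
          · simp at h; omega
        obtain ⟨heq, hge⟩ := altLoop_nonneg (l' ++ [x]) 0 (le_refl 0) hnn hp
        rw [heq]
        omega

theorem sumW : ∀ (l : List Int),
    ((List.range l.length).map (fun k : Nat => ((l.length : Int) - (k : Int)) * l.getD k 0)).sum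
      = WSum l 0 := by
  intro l
  induction l with
  | nil => simp [WSum]
  | cons x r ihr =>
      rw [List.length_cons, List.range_succ_eq_map]
      simp only [List.map_cons, List.map_map, List.sum_cons, List.getD_cons_zero]
      have hmap : (List.range r.length).map
            ((fun k : Nat => (((r.length + 1 : Nat) : Int) - (k : Int)) * (x :: r).getD k 0) ∘ Nat.succ)
          = (List.range r.length).map (fun k : Nat => ((r.length : Int) - (k : Int)) * r.getD k 0) := by
        apply List.map_congr_left
        intro a _
        simp only [Function.comp_apply, List.getD_cons_succ]
        push_cast
        ring
      rw [hmap, ihr]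
      have hW : WSum (x :: r) 0 = WSum r 0 + ((r.length : Int) + 1) * x := by
        simp only [WSum]
        rw [show (0 : Int) + x = 0 + x by rfl, WSum_shift r 0 x]
        ring
      rw [hW]
      push_cast
      ring

theorem ans_eq_WSum : ∀ (l : List Int),
    (PySem.List.pyRange 0 (l.length : Int) 1).foldl
      (fun acc i => acc + ((l.length : Int) - i) * PySem.List.pyGetD l i 0) 0 = WSum l 0 := by
  intro l
  have hfold : ∀ (g : Int → Int) (xs : List Int) (a : Int),
      xs.foldl (fun acc i => acc + g i) a = a + (xs.map g).sum := by
    intro g xs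
    induction xs with
    | nil => intro a; simp
    | cons y r ihr => intro a; simp [List.foldl_cons, ihr]; ring
  rw [hfold, zero_add, PySem.List.pyRange_one, List.map_map]
  rw [← sumW l]
  apply congrArg
  simp only [Int.sub_zero, Int.toNat_natCast]
  apply List.map_congr_left
  intro a _
  simp only [Function.comp_apply, zero_add, PySem.List.pyGetD_natCast]

-- ===== VERDICT (by name: the statement is the Claim_ definition above) =====
theorem maxSatisfaction_spec : Claim_equal_maxSatisfaction := by
  intro satisfaction _
  have hp : (PySem.List.sorted satisfaction (fun x => x) true).Pairwise (fun a b => b ≤ a) :=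
    PySem.List.sorted_pairwise_rev satisfaction (fun x => x)
  simp only [Spec_maxSatisfaction, maxSatisfaction, maxSatisfaction_alt]
  rw [ans_eq_WSum]
  exact main_loop_eq _ hp
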